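-- pv_equiv track=rewrite | github.com/derdydancer/story-page | image-formats/generate_image_prompts.py | get_location_details
-- ===== SOURCE A (Python) =====
-- def get_location_details(location_name_from_chapter, locations_data):
--     location_info = None
--     # Try exact match from 'Name' field in locations_data
--     for loc_def in locations_data:
--         if loc_def.get('Name') == location_name_from_chapter:
--             location_info = loc_def
--             break
--
--     # If exact match not found, try partial match (e.g., "Royal Palace" for "Royal Palace courtyard")
--     if not location_info:
--         for loc_def in locations_data:
--             if loc_def.get('Name') and loc_def['Name'] in location_name_from_chapter:
--                 location_info = loc_def
--                 break
--
--     if not location_info: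
--         return (f"Detailed Description: Details for location '{location_name_from_chapter}' not found.\n"
--                 f"Props: N/A\n"
--                 f"Architectural Style: N/A\n")
--
--     desc = location_info.get('Description', 'N/A')
--     props = location_info.get('List of props present', 'N/A')
--     arch_style = location_info.get('Architectural style (if any)', 'N/A')
--
--     return (f"Detailed Description: {desc}\n"
--             f"Props: {props}\n"
--             f"Architectural Style: {arch_style}\n")
-- ===== SOURCE B (Python) =====
-- def get_location_details(location_name_from_chapter, locations_data):
--     # single pass: exact match wins immediately; remember the first substring match as fallback
--     found = None
--     fallback = None
--     for loc_def in locations_data: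
--         nm = loc_def.get('Name')
--         if nm == location_name_from_chapter:
--             found = loc_def
--             break
--         if fallback is None and nm and nm in location_name_from_chapter:
--             fallback = loc_def
--     if found is None:
--         found = fallback
--     if found is None:
--         return (f"Detailed Description: Details for location '{location_name_from_chapter}' not found.\n"
--                 f"Props: N/A\n"
--                 f"Architectural Style: N/A\n")
--     return (f"Detailed Description: {found.get('Description', 'N/A')}\n"
--             f"Props: {found.get('List of props present', 'N/A')}\n"
--             f"Architectural Style: {found.get('Architectural style (if any)', 'N/A')}\n")
-- ===== Notes on version B (the rewrite author's own statement) =====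
-- stated objective: alternative
-- what changed: A's two sequential scans (exact match pass, then a separate substring-match pass) are merged into one pass that breaks on an exact match and records the first substring match in a fallback variable used only if no exact match is found.
import Mathlib
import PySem

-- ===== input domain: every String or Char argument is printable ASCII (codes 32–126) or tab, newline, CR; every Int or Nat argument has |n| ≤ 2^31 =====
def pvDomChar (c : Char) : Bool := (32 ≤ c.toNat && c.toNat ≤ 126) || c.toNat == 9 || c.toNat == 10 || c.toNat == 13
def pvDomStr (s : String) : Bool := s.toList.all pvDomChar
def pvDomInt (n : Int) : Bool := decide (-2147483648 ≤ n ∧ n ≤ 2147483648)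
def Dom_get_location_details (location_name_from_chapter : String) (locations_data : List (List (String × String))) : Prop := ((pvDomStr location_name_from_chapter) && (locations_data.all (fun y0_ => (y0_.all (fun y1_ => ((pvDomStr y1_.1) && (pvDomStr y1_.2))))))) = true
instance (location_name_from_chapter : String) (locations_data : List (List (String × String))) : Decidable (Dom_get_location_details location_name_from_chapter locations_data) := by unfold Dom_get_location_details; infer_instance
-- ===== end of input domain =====

-- B merges A's two sequential scans into one pass that keeps the first substring match as a
-- fallback while an exact match still wins immediately (objective: alternative decomposition).

-- shared primitive: Python's dict .get on an association list (first match)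
def pvGet (d : List (String × String)) (k : String) : Option String :=
  (PySem.Dict.mk d).get? k

-- shared condition: `loc_def.get('Name') and loc_def['Name'] in location_name_from_chapter`
def pvNamePartial (nm : Option String) (target : String) : Bool :=
  match nm with
  | none => false
  | some s => !(s == "") && PySem.Str.isIn s target

-- Python truthiness of an Optional dict (`not location_info`): None or empty dict
def pvFalsy (o : Option (List (String × String))) : Bool :=
  match o with
  | none => true
  | some d => d.isEmpty

-- ===== PORT A =====
-- A's first loop: exact match on 'Name', break on first hit
def pvFindExact (name : String) : List (List (String × String)) → Option (List (String × String))
  | [] => none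
  | d :: rest => if pvGet d "Name" = some name then some d else pvFindExact name rest

-- A's second loop: first dict whose truthy 'Name' is a substring of the chapter name
def pvFindPartial (name : String) : List (List (String × String)) → Option (List (String × String))
  | [] => none
  | d :: rest => if pvNamePartial (pvGet d "Name") name then some d else pvFindPartial name rest

def get_location_details (location_name_from_chapter : String) (locations_data : List (List (String × String))) : String :=
  let location_info := pvFindExact location_name_from_chapter locations_data
  let location_info := if pvFalsy location_info then pvFindPartial location_name_from_chapter locations_data else location_info
  if pvFalsy location_info then
    "Detailed Description: Details for location '" ++ location_name_from_chapter ++ "' not found.\nProps: N/A\nArchitectural Style: N/A\n"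
  else
    let d := location_info.getD []
    "Detailed Description: " ++ (pvGet d "Description").getD "N/A" ++
      "\nProps: " ++ (pvGet d "List of props present").getD "N/A" ++
      "\nArchitectural Style: " ++ (pvGet d "Architectural style (if any)").getD "N/A" ++ "\n"

-- ===== PORT B =====
-- B's single loop: exact match returns at once; fallback records the first substring match
def pvScan (name : String) : List (List (String × String)) → Option (List (String × String)) → Option (List (String × String))
  | [], fallback => fallback
  | d :: rest, fallback =>
      let nm := pvGet d "Name"
      if nm = some name then some d
      else pvScan name rest (if fallback.isNone && pvNamePartial nm name then some d else fallback)

def get_location_details_alt (location_name_from_chapter : String) (locations_data : List (List (String × String))) : String :=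
  match pvScan location_name_from_chapter locations_data none with
  | none =>
      "Detailed Description: Details for location '" ++ location_name_from_chapter ++ "' not found.\nProps: N/A\nArchitectural Style: N/A\n"
  | some found =>
      "Detailed Description: " ++ (pvGet found "Description").getD "N/A" ++
        "\nProps: " ++ (pvGet found "List of props present").getD "N/A" ++
        "\nArchitectural Style: " ++ (pvGet found "Architectural style (if any)").getD "N/A" ++ "\n"

-- ===== PRECONDITION & SPEC =====
def Spec_get_location_details (location_name_from_chapter : String) (locations_data : List (List (String × String))) (out : String) : Prop := out = get_location_details_alt location_name_from_chapter locations_data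
instance (location_name_from_chapter : String) (locations_data : List (List (String × String))) (out : String) : Decidable (Spec_get_location_details location_name_from_chapter locations_data out) := by unfold Spec_get_location_details; infer_instance

-- ===== CLAIM (what is proved, stated in full; the proofs are below) =====
def Claim_equal_get_location_details : Prop := ∀ (location_name_from_chapter : String) (locations_data : List (List (String × String))), Dom_get_location_details location_name_from_chapter locations_data → Spec_get_location_details location_name_from_chapter locations_data (get_location_details location_name_from_chapter locations_data)

-- ===== LEMMAS AND PROOFS =====

theorem pvGet_nil (k : String) : pvGet [] k = none := rfl

theorem pvFindExact_ne_nil {name : String} {locs : List (List (String × String))}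
    {d : List (String × String)} (h : pvFindExact name locs = some d) : d ≠ [] := by
  induction locs with
  | nil => simp [pvFindExact] at h
  | cons x rest ih =>
    by_cases hx : pvGet x "Name" = some name
    · simp [pvFindExact, hx] at h
      subst h
      rintro rfl
      simp [pvGet_nil] at hx
    · simp [pvFindExact, hx] at h
      exact ih h

theorem pvFindPartial_ne_nil {name : String} {locs : List (List (String × String))}
    {d : List (String × String)} (h : pvFindPartial name locs = some d) : d ≠ [] := by
  induction locs with
  | nil => simp [pvFindPartial] at h
  | cons x rest ih =>
    by_cases hx : pvNamePartial (pvGet x "Name") name = true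
    · simp [pvFindPartial, hx] at h
      subst h
      rintro rfl
      simp [pvGet_nil, pvNamePartial] at hx
    · simp [pvFindPartial, hx] at h
      exact ih h

-- characterisation of B's single pass by A's two loops
theorem pvScan_eq (name : String) (locs : List (List (String × String)))
    (fb : Option (List (String × String))) :
    pvScan name locs fb =
      match pvFindExact name locs with
      | some d => some d
      | none =>
        match fb with
        | some f => some f
        | none => pvFindPartial name locs := by
  induction locs generalizing fb with
  | nil => cases fb <;> rfl
  | cons x rest ih =>
    by_cases hx : pvGet x "Name" = some name
    · simp [pvScan, pvFindExact, hx]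
    · cases fb with
      | some f =>
        simp [pvScan, pvFindExact, hx, ih]
      | none =>
        by_cases hp : pvNamePartial (pvGet x "Name") name = true
        · simp [pvScan, pvFindExact, pvFindPartial, hx, hp, ih]
        · simp [pvScan, pvFindExact, pvFindPartial, hx, hp, ih]

-- ===== VERDICT (by name: the statement is the Claim_ definition above) =====
theorem get_location_details_spec : Claim_equal_get_location_details := by
  intro name locs _
  unfold Spec_get_location_details get_location_details get_location_details_alt
  rw [pvScan_eq]
  cases hE : pvFindExact name locs with
  | some d =>
    have hne : d ≠ [] := pvFindExact_ne_nil hE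
    simp [pvFalsy, List.isEmpty_iff, hne]
  | none =>
    cases hP : pvFindPartial name locs with
    | some d =>
      have hne : d ≠ [] := pvFindPartial_ne_nil hP
      simp [pvFalsy, List.isEmpty_iff, hne]
    | none =>
      simp [pvFalsy]
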